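-- pv_equiv track=rewrite | github.com/FlandreSatori/astrbot_plugin_steam_friend_monitor | main.py | _order_players_by_ids
-- ===== SOURCE A (Python) =====
-- from typing import Any, Dict, List
--
-- def _dedup_keep_order(items):
--     return list(dict.fromkeys(x for x in items if x))
--
-- def _order_players_by_ids(
--     players: List[Dict[str, Any]], steam_ids: List[str]
-- ) -> List[Dict[str, Any]]:
--     if not players:
--         return []
--
--     desired = _dedup_keep_order(steam_ids)
--     player_map = {str(p.get("steamid", "")): p for p in players}
--
--     ordered = [player_map[sid] for sid in desired if sid in player_map]
--     return ordered
-- ===== SOURCE B (Python) =====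
-- def _dedup_keep_order(items):
--     return list(dict.fromkeys(x for x in items if x))
--
-- def _order_players_by_ids(players, steam_ids):
--     if not players:
--         return []
--     desired = _dedup_keep_order(steam_ids)
--     pos = {sid: i for i, sid in enumerate(desired)}
--     result = [None] * len(desired)
--     for p in players:
--         i = pos.get(str(p.get("steamid", "")))
--         if i is not None:
--             result[i] = p
--     return [p for p in result if p is not None]
-- ===== Notes on version B (the rewrite author's own statement) =====
-- stated objective: alternative
-- what changed: Replaces A's build-a-full-player_map-then-gather-by-desired-order with a position index over the deduped ids and a single scatter pass over players into a preallocated slot array (later players overwrite, preserving last-wins), then compacting the filled slots.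
import Mathlib
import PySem

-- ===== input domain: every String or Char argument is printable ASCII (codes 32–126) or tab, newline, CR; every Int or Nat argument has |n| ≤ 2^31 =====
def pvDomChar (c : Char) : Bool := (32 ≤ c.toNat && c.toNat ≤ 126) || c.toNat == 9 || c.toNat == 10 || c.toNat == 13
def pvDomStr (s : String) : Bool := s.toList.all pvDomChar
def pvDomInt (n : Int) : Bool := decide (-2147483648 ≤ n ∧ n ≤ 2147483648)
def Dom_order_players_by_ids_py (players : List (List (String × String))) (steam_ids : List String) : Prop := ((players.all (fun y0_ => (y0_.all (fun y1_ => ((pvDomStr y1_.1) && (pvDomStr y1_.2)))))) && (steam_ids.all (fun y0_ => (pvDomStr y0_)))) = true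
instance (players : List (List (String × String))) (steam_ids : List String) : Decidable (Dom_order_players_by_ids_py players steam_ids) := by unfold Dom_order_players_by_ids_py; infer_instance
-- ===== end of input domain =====

-- B replaces A's player_map-then-gather with a position index and one scatter pass into
-- a preallocated slot list (alternative decomposition, same cost).


-- shared helper: str(p.get("steamid", "")) — values are already strings, so str() is identity
def pvSid (p : List (String × String)) : String := (PySem.Dict.mk p).getD "steamid" ""

-- ===== PORT A =====
def order_players_by_ids_py (players : List (List (String × String))) (steam_ids : List String) : List (List (String × String)) :=
  if players = [] then []
  else
    let desired := PySem.Set.ofList (steam_ids.filter (fun x => x != ""))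
    let player_map := players.foldl (fun d p => d.insert (pvSid p) p) PySem.Dict.empty
    desired.filterMap (fun sid => if player_map.contains sid then player_map.get? sid else none)

-- ===== PORT B =====
def order_players_by_ids_py_alt (players : List (List (String × String))) (steam_ids : List String) : List (List (String × String)) :=
  if players = [] then []
  else
    let desired := PySem.Set.ofList (steam_ids.filter (fun x => x != ""))
    let pos := (PySem.List.enumerate desired 0).foldl (fun d q => d.insert q.2 q.1) PySem.Dict.empty
    let result := players.foldl
      (fun r p =>
        match pos.get? (pvSid p) with
        | some i => PySem.List.pySetD r i (some p)
        | none => r)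
      (List.replicate desired.length (none : Option (List (String × String))))
    result.filterMap id

-- ===== PRECONDITION & SPEC =====
def Spec_order_players_by_ids_py (players : List (List (String × String))) (steam_ids : List String) (out : List (List (String × String))) : Prop := out = order_players_by_ids_py_alt players steam_ids
instance (players : List (List (String × String))) (steam_ids : List String) (out : List (List (String × String))) : Decidable (Spec_order_players_by_ids_py players steam_ids out) := by unfold Spec_order_players_by_ids_py; infer_instance

-- ===== CLAIM (what is proved, stated in full; the proofs are below) =====
def Claim_equal_order_players_by_ids_py : Prop := ∀ (players : List (List (String × String))) (steam_ids : List String), Dom_order_players_by_ids_py players steam_ids → Spec_order_players_by_ids_py players steam_ids (order_players_by_ids_py players steam_ids)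

-- ===== LEMMAS AND PROOFS =====

-- the position dict looks up the (unique) index of s in xs
theorem pos_get? (xs : List String) (k : Int) (d : PySem.Dict String Int) (hn : xs.Nodup) (s : String) :
    ((PySem.List.enumerate xs k).foldl (fun d q => d.insert q.2 q.1) d).get? s =
      match PySem.List.index? xs s with
      | some n => some (k + n)
      | none => d.get? s := by
  induction xs generalizing k d with
  | nil => simp [PySem.List.enumerate_nil, PySem.List.index?]
  | cons x xs ih =>
    rw [PySem.List.enumerate_cons]
    simp only [List.foldl_cons]
    rcases List.nodup_cons.mp hn with ⟨hx, hxs⟩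
    by_cases hsx : s = x
    · subst hsx
      rw [ih (k + 1) _ hxs, PySem.List.index?_cons_self]
      have h0 : PySem.List.index? xs s = none := (PySem.List.index?_eq_none_iff xs s).mpr hx
      rw [h0]
      simp [PySem.Dict.get?_insert_self]
    · rw [ih (k + 1) _ hxs, PySem.List.index?_cons_of_ne xs (Ne.symm hsx)]
      cases h : PySem.List.index? xs s with
      | some n => simp only [Option.map_some]; congr 1; push_cast; ring
      | none => simp [PySem.Dict.get?_insert_of_ne d k hsx]

-- one scatter step keeps the slot array equal to the map of lookups
theorem scatter_invariant (ps : List (List (String × String))) (desired : List String)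
    (hn : desired.Nodup) (d : PySem.Dict String (List (String × String))) :
    ps.foldl
      (fun r p =>
        match ((PySem.List.enumerate desired 0).foldl (fun d q => d.insert q.2 q.1) PySem.Dict.empty).get? (pvSid p) with
        | some i => PySem.List.pySetD r i (some p)
        | none => r)
      (desired.map (fun s => d.get? s))
    = desired.map (fun s => (ps.foldl (fun d p => d.insert (pvSid p) p) d).get? s) := by
  induction ps generalizing d with
  | nil => rfl
  | cons p ps ih =>
    simp only [List.foldl_cons]
    rw [pos_get? desired 0 _ hn (pvSid p)]
    have key : (match (match PySem.List.index? desired (pvSid p) with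
                  | some n => some ((0 : Int) + n)
                  | none => (PySem.Dict.empty : PySem.Dict String Int).get? (pvSid p)) with
                | some i => PySem.List.pySetD (desired.map (fun s => d.get? s)) i (some p)
                | none => desired.map (fun s => d.get? s))
        = desired.map (fun s => (d.insert (pvSid p) p).get? s) := by
      cases h : PySem.List.index? desired (pvSid p) with
      | none =>
        have hmem : pvSid p ∉ desired := (PySem.List.index?_eq_none_iff desired (pvSid p)).mp h
        simp only [PySem.Dict.get?_empty]
        apply List.map_congr_left
        intro s hs
        exact (PySem.Dict.get?_insert_of_ne d p (fun hc => hmem (by rwa [hc] at hs))).symm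
      | some n =>
        obtain ⟨hk, hval, _⟩ := PySem.List.getElem_of_index?_eq_some h
        simp only [Int.zero_add]
        rw [PySem.List.pySetD_natCast]
        apply List.ext_getElem
        · simp
        · intro j h1 h2
          have hj : j < desired.length := by simpa using h2
          simp only [List.getElem_set, List.getElem_map]
          by_cases hjn : j = n
          · subst hjn
            simp [hval, PySem.Dict.get?_insert_self]
          · have hne : desired[j] ≠ pvSid p := by
              intro he
              exact hjn (List.Nodup.getElem_inj_iff hn |>.mp (he.trans hval.symm))
            rw [if_neg (fun he => hjn he.symm), PySem.Dict.get?_insert_of_ne d p hne]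
    rw [key, ih (d.insert (pvSid p) p)]

theorem guard_eq_get? (m : PySem.Dict String (List (String × String))) :
    (fun sid => if m.contains sid then m.get? sid else none) = m.get? := by
  funext sid
  rw [PySem.Dict.contains_eq_isSome_get?]
  cases m.get? sid <;> simp

-- ===== VERDICT (by name: the statement is the Claim_ definition above) =====
theorem order_players_by_ids_py_spec : Claim_equal_order_players_by_ids_py := by
  intro players steam_ids _
  unfold Spec_order_players_by_ids_py order_players_by_ids_py order_players_by_ids_py_alt
  by_cases hp : players = []
  · simp [hp]
  · simp only [hp, if_false]
    set desired := PySem.Set.ofList (steam_ids.filter (fun x => x != "")) with hdes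
    have hn : desired.Nodup := PySem.Set.nodup_ofList _
    have hrep : (List.replicate desired.length (none : Option (List (String × String))))
        = desired.map (fun s => (PySem.Dict.empty : PySem.Dict String (List (String × String))).get? s) := by
      simp [List.map_const']
    rw [guard_eq_get?, hrep, scatter_invariant players desired hn PySem.Dict.empty,
      List.filterMap_map]
    rfl
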